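-- pv_equiv track=rewrite | github.com/ruc-datalab/Haipipe | haipipe/core/al/utils/runner.py | found_dataset
-- ===== SOURCE A (Python) =====
-- def found_dataset(old_path, notebook_id, root_path, origin_code):
--     old_root_path = ''
--     if '/' not in old_path:
--         result = root_path + '/' + old_path
--         old_root_path = old_path
--     else:
--         for index, i in enumerate(old_path.split('/')):
--             if index != len(old_path.split('/')) - 1:
--                 old_root_path = old_root_path + i + '/'
--             else:
--                 if '.' not in i:
--                     old_root_path = old_root_path + i
--                 if '/' == old_root_path[-1]:
--                     old_root_path = old_root_path[0:-1]
--
--         result = root_path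
--     return origin_code.replace(old_root_path, result)
-- ===== SOURCE B (Python) =====
-- def found_dataset(old_path, notebook_id, root_path, origin_code):
--     if '/' not in old_path:
--         old_root_path = old_path
--         result = root_path + '/' + old_path
--     else:
--         head, _, tail = old_path.rpartition('/')
--         old_root_path = old_path if (tail and '.' not in tail) else head
--         result = root_path
--     return origin_code.replace(old_root_path, result)
-- ===== Notes on version B (the rewrite author's own statement) =====
-- stated objective: simpler
-- what changed: Replaces A's enumerate-over-split('/') loop that rebuilds old_root_path piece by piece and then strips a trailing '/' with a single rpartition('/') at the last slash plus one conditional choosing old_path or its head.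
import Mathlib
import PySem

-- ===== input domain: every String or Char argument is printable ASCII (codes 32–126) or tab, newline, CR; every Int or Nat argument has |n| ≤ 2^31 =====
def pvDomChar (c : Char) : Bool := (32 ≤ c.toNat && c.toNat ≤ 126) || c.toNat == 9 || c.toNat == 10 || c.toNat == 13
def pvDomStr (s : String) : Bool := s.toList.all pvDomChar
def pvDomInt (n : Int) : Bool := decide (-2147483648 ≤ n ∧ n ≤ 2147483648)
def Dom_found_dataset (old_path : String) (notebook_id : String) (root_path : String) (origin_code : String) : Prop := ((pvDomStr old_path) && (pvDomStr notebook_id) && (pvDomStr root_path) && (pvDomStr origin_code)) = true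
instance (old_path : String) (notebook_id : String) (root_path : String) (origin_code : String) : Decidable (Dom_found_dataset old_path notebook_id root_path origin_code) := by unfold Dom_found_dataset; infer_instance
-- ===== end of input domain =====

-- B replaces A's enumerate-split loop by a single rpartition at the last '/', same return value (objective: simpler).

-- ===== PORT A =====
-- literal port of A: split on '/', loop with enumerate, rebuild old_root_path, strip a trailing '/'
def found_dataset (old_path : String) (notebook_id : String) (root_path : String) (origin_code : String) : String :=
  let p := old_path.toList
  if PySem.Chars.isIn ['/'] p = false then
    String.mk (PySem.Chars.replace origin_code.toList p (root_path.toList ++ ['/'] ++ p))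
  else
    let orp := (PySem.List.enumerate (PySem.Chars.splitOn p ['/'])).foldl
      (fun acc pr =>
        if pr.1 ≠ ((PySem.Chars.splitOn p ['/']).length : Int) - 1 then
          acc ++ pr.2 ++ ['/']
        else
          let acc1 := if PySem.Chars.isIn ['.'] pr.2 = false then acc ++ pr.2 else acc
          if PySem.List.pyGet? acc1 (-1) = some '/' then PySem.List.slice acc1 (some 0) (some (-1)) else acc1)
      []
    String.mk (PySem.Chars.replace origin_code.toList orp root_path.toList)

-- ===== PORT B =====
-- literal port of B: head/tail by rpartition('/') (hand-ported for the single-char separator, exact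
-- when the separator occurs, which is the only case B reaches it in)
def found_dataset_alt (old_path : String) (notebook_id : String) (root_path : String) (origin_code : String) : String :=
  let p := old_path.toList
  if PySem.Chars.isIn ['/'] p = false then
    String.mk (PySem.Chars.replace origin_code.toList p (root_path.toList ++ ['/'] ++ p))
  else
    let tl := (p.reverse.takeWhile (fun c => c ≠ '/')).reverse
    let hd := ((p.reverse.dropWhile (fun c => c ≠ '/')).drop 1).reverse
    let orp := if tl.isEmpty = false ∧ PySem.Chars.isIn ['.'] tl = false then p else hd
    String.mk (PySem.Chars.replace origin_code.toList orp root_path.toList)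

-- ===== PRECONDITION & SPEC =====
def Spec_found_dataset (old_path : String) (notebook_id : String) (root_path : String) (origin_code : String) (out : String) : Prop := out = found_dataset_alt old_path notebook_id root_path origin_code
instance (old_path : String) (notebook_id : String) (root_path : String) (origin_code : String) (out : String) : Decidable (Spec_found_dataset old_path notebook_id root_path origin_code out) := by unfold Spec_found_dataset; infer_instance

-- ===== CLAIM (what is proved, stated in full; the proofs are below) =====
def Claim_equal_found_dataset : Prop := ∀ (old_path : String) (notebook_id : String) (root_path : String) (origin_code : String), Dom_found_dataset old_path notebook_id root_path origin_code → Spec_found_dataset old_path notebook_id root_path origin_code (found_dataset old_path notebook_id root_path origin_code)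

-- ===== LEMMAS AND PROOFS =====

def mySplit : List Char → List (List Char)
  | [] => [[]]
  | c :: rest => if c = '/' then [] :: mySplit rest else (mySplit rest).modifyHead (c :: ·)

def preC (xs : List (List Char)) : List Char := (xs.map (· ++ ['/'])).flatten

def pS : Char → Bool := fun c => c ≠ '/'

def tailT (p : List Char) : List Char := (p.reverse.takeWhile pS).reverse

def dropT (p : List Char) : List Char := (p.reverse.dropWhile pS).reverse

def bodyA (N : Int) (acc : List Char) (pr : Int × List Char) : List Char :=
  if pr.1 ≠ N then
    acc ++ pr.2 ++ ['/']
  else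
    let acc1 := if PySem.Chars.isIn ['.'] pr.2 = false then acc ++ pr.2 else acc
    if PySem.List.pyGet? acc1 (-1) = some '/' then PySem.List.slice acc1 (some 0) (some (-1)) else acc1

theorem go_eq (fuel : Nat) (l cur : List Char) (acc : List (List Char)) (h : l.length < fuel) :
    PySem.Chars.splitOn.go ['/'] fuel l cur acc = acc.reverse ++ (mySplit l).modifyHead (cur.reverse ++ ·) := by
  induction fuel generalizing l cur acc with
  | zero => omega
  | succ f ih =>
    cases l with
    | nil =>
      simp [PySem.Chars.splitOn.go, mySplit]
    | cons c rest =>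
      by_cases hc : c = '/'
      · subst hc
        rw [PySem.Chars.splitOn.go]
        simp only [List.isPrefixOf, beq_self_eq_true, Bool.true_and, List.isPrefixOf_nil_left, if_true]
        show PySem.Chars.splitOn.go ['/'] f rest [] (cur.reverse :: acc) = _
        rw [ih rest [] (cur.reverse :: acc) (by simp at h ⊢; omega)]
        simp [mySplit]
        cases mySplit rest <;> simp
      · rw [PySem.Chars.splitOn.go]
        have : (['/'].isPrefixOf (c :: rest)) = false := by
          simp [List.isPrefixOf]; exact fun hh => absurd hh.symm hc
        rw [this]
        simp only [Bool.false_eq_true, if_false]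
        rw [ih rest (c :: cur) acc (by simp at h ⊢; omega)]
        simp [mySplit, hc]
        cases mySplit rest <;> simp

theorem splitOn_slash (p : List Char) : PySem.Chars.splitOn p ['/'] = mySplit p := by
  rw [PySem.Chars.splitOn, go_eq p.length.succ p [] [] (by omega)]
  cases mySplit p <;> simp

theorem mySplit_ne_nil (p : List Char) : mySplit p ≠ [] := by
  induction p with
  | nil => simp [mySplit]
  | cons c rest ih =>
    simp only [mySplit]
    split
    · simp
    · cases hm : mySplit rest with
      | nil => exact absurd hm ih
      | cons a t => simp

theorem mySplit_two_le (p : List Char) (h : '/' ∈ p) : 2 ≤ (mySplit p).length := by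
  induction p with
  | nil => simp at h
  | cons c rest ih =>
    simp only [mySplit]
    by_cases hc : c = '/'
    · rw [if_pos hc]
      have hne := mySplit_ne_nil rest
      cases hm : mySplit rest with
      | nil => exact absurd hm hne
      | cons a t => simp
    · rw [if_neg hc, List.length_modifyHead]
      apply ih
      rcases List.mem_cons.mp h with h1 | h2
      · exact absurd h1.symm hc
      · exact h2

theorem mySplit_no_slash (p : List Char) (h : '/' ∉ p) : mySplit p = [p] := by
  induction p with
  | nil => simp [mySplit]
  | cons c rest ih =>
    have hc : c ≠ '/' := fun hh => h (hh ▸ List.mem_cons_self)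
    have hr : '/' ∉ rest := fun hh => h (List.mem_cons_of_mem _ hh)
    simp [mySplit, hc, ih hr]

theorem dw_app (xs l : List Char) (hx : '/' ∈ xs) :
    (xs ++ l).dropWhile pS = xs.dropWhile pS ++ l := by
  rw [List.dropWhile_append]
  have : (xs.dropWhile pS).isEmpty = false := by
    rw [List.isEmpty_eq_false_iff, Ne, List.dropWhile_eq_nil_iff]
    intro hall
    have := hall '/' hx
    simp [pS] at this
  rw [this]
  simp

theorem tw_app (xs l : List Char) (hx : '/' ∈ xs) :
    (xs ++ l).takeWhile pS = xs.takeWhile pS := by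
  rw [List.takeWhile_append]
  have hlt : (xs.takeWhile pS).length ≠ xs.length := by
    intro hl
    have heq : xs.takeWhile pS = xs := (List.takeWhile_sublist _).eq_of_length hl
    have := List.takeWhile_eq_self_iff.mp heq '/' hx
    simp [pS] at this
  rw [if_neg hlt]

theorem dw_all (xs l : List Char) (hx : '/' ∉ xs) :
    (xs ++ l).dropWhile pS = l.dropWhile pS := by
  rw [List.dropWhile_append]
  have : (xs.dropWhile pS).isEmpty = true := by
    rw [List.isEmpty_iff, List.dropWhile_eq_nil_iff]
    intro x hxx
    have : x ≠ '/' := fun h => hx (h ▸ hxx)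
    simp [pS, this]
  rw [this]
  simp

theorem tw_all (xs l : List Char) (hx : '/' ∉ xs) :
    (xs ++ l).takeWhile pS = xs ++ l.takeWhile pS := by
  rw [List.takeWhile_append]
  have : (xs.takeWhile pS).length = xs.length := by
    rw [List.takeWhile_eq_self_iff.mpr]
    intro x hxx
    have : x ≠ '/' := fun h => hx (h ▸ hxx)
    simp [pS, this]
  rw [if_pos this]

theorem pS_slash : pS '/' = false := by simp [pS]

theorem struct (p : List Char) (h : '/' ∈ p) :
    preC ((mySplit p).dropLast) = dropT p ∧ (mySplit p).getLastD [] = tailT p := by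
  induction p with
  | nil => simp at h
  | cons c rest ih =>
    have hrev : (c :: rest).reverse = rest.reverse ++ [c] := by simp
    by_cases hc : c = '/'
    · subst hc
      by_cases hr : '/' ∈ rest
      · obtain ⟨ih1, ih2⟩ := ih hr
        have hne := mySplit_ne_nil rest
        have hmr : '/' ∈ rest.reverse := by simpa using hr
        constructor
        · rw [mySplit, if_pos rfl]
          have hdl : ([] :: mySplit rest).dropLast = [] :: (mySplit rest).dropLast := by
            cases hm : mySplit rest with
            | nil => exact absurd hm hne
            | cons a t => simp
          rw [hdl]
          have hpre : preC ([] :: (mySplit rest).dropLast) = '/' :: preC ((mySplit rest).dropLast) := by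
            simp [preC]
          rw [hpre, ih1, dropT, dropT, hrev, dw_app _ _ hmr]
          simp
        · rw [mySplit, if_pos rfl]
          have hgl : ([] :: mySplit rest).getLastD [] = (mySplit rest).getLastD [] := by
            cases hm : mySplit rest with
            | nil => exact absurd hm hne
            | cons a t => simp [List.getLastD]
          rw [hgl, ih2, tailT, tailT, hrev, tw_app _ _ hmr]
      · rw [mySplit, if_pos rfl, mySplit_no_slash rest hr]
        have hmr : '/' ∉ rest.reverse := by simpa using hr
        constructor
        · rw [dropT, hrev, dw_all _ _ hmr]
          simp [preC, List.dropWhile, pS_slash]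
        · rw [tailT, hrev, tw_all _ _ hmr]
          simp [List.takeWhile, pS_slash, List.getLastD]
    · have hr : '/' ∈ rest := by
        rcases List.mem_cons.mp h with h1 | h2
        · exact absurd h1.symm hc
        · exact h2
      obtain ⟨ih1, ih2⟩ := ih hr
      have h2 := mySplit_two_le rest hr
      have hmr : '/' ∈ rest.reverse := by simpa using hr
      obtain ⟨a, t, hm⟩ : ∃ a t, mySplit rest = a :: t := by
        cases hm : mySplit rest with
        | nil => exact absurd hm (mySplit_ne_nil rest)
        | cons a t => exact ⟨a, t, rfl⟩
      have ht : t ≠ [] := by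
        intro hh
        rw [hm, hh] at h2
        simp at h2
      rw [mySplit, if_neg hc, hm]
      constructor
      · have hdl : ((c :: a) :: t).dropLast = (c :: a) :: t.dropLast := by
          cases t with
          | nil => exact absurd rfl ht
          | cons b u => simp
        have hdl2 : (a :: t).dropLast = a :: t.dropLast := by
          cases t with
          | nil => exact absurd rfl ht
          | cons b u => simp
        simp only [List.modifyHead, hdl]
        have hp2 : preC ((c :: a) :: t.dropLast) = c :: preC (a :: t.dropLast) := by
          simp [preC]
        rw [hp2, ← hdl2, ← hm, ih1, dropT, dropT, hrev, dw_app _ _ hmr]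
        simp
      · have hgl : ((c :: a) :: t).getLastD [] = (a :: t).getLastD [] := by
          cases t with
          | nil => exact absurd rfl ht
          | cons b u => simp [List.getLastD]
        simp only [List.modifyHead, hgl, ← hm, ih2]
        rw [tailT, tailT, hrev, tw_app _ _ hmr]

theorem foldA_pre (xs : List (List Char)) (N : Int) (s : Int) (acc : List Char)
    (h : s + xs.length ≤ N) :
    List.foldl (bodyA N) acc (PySem.List.enumerate xs s) = acc ++ preC xs := by
  induction xs generalizing s acc with
  | nil => simp [preC, PySem.List.enumerate]
  | cons q rest ih =>
    rw [PySem.List.enumerate_cons, List.foldl_cons]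
    have hs : s ≠ N := by
      simp only [List.length_cons] at h
      push_cast at h
      omega
    rw [show bodyA N acc (s, q) = acc ++ q ++ ['/'] from by rw [bodyA, if_pos hs]]
    rw [ih (s + 1) _ (by simp at h ⊢; omega)]
    simp [preC]

theorem pyGet_concat (xs : List Char) (a : Char) :
    PySem.List.pyGet? (xs ++ [a]) (-1) = some a := by
  simp only [PySem.List.pyGet?, PySem.List.pyIdx?, List.length_append, List.length_cons,
    List.length_nil]
  have h0 : ¬ ((0:Int) ≤ -1) := by omega
  rw [if_neg h0, if_pos (by push_cast; omega)]
  simp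

theorem slice_dropLast (xs : List Char) :
    PySem.List.slice xs (some 0) (some (-1)) = xs.dropLast := by
  simp only [PySem.List.slice, PySem.List.clampIdx]
  cases xs with
  | nil => simp
  | cons c rest =>
    have h1 : ¬ ((0:Int) < 0) := by omega
    have h2 : ((-1:Int) < 0) := by omega
    rw [if_neg h1, if_pos h2]
    have h3 : ¬ ((((c :: rest).length : Int)) + (-1) < 0) := by
      simp
    rw [if_neg h3]
    simp [List.dropLast_eq_take]

theorem key (p : List Char) (h : PySem.Chars.isIn ['/'] p = true) :
    (PySem.List.enumerate (PySem.Chars.splitOn p ['/'])).foldl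
      (fun acc pr =>
        if pr.1 ≠ ((PySem.Chars.splitOn p ['/']).length : Int) - 1 then
          acc ++ pr.2 ++ ['/']
        else
          let acc1 := if PySem.Chars.isIn ['.'] pr.2 = false then acc ++ pr.2 else acc
          if PySem.List.pyGet? acc1 (-1) = some '/' then PySem.List.slice acc1 (some 0) (some (-1)) else acc1)
      []
    = (if ((p.reverse.takeWhile (fun c => c ≠ '/')).reverse).isEmpty = false ∧
          PySem.Chars.isIn ['.'] ((p.reverse.takeWhile (fun c => c ≠ '/')).reverse) = false
       then p else ((p.reverse.dropWhile (fun c => c ≠ '/')).drop 1).reverse) := by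
  show _ = (if (tailT p).isEmpty = false ∧ PySem.Chars.isIn ['.'] (tailT p) = false
       then p else ((p.reverse.dropWhile pS).drop 1).reverse)
  have hmem : '/' ∈ p := by
    obtain ⟨s, t, hst⟩ := (PySem.Chars.isIn_iff_infix _ _).mp h
    rw [← hst]
    simp
  have hmr : '/' ∈ p.reverse := by simpa using hmem
  have hdne : p.reverse.dropWhile pS ≠ [] := by
    rw [Ne, List.dropWhile_eq_nil_iff]
    intro hall
    have := hall '/' hmr
    simp [pS] at this
  obtain ⟨w, hw⟩ : ∃ w, p.reverse.dropWhile pS = '/' :: w := by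
    cases hd : p.reverse.dropWhile pS with
    | nil => exact absurd hd hdne
    | cons x xs =>
      have h2 := List.head_dropWhile_not pS hdne
      have h1 : (List.dropWhile pS p.reverse).head? = some x := by rw [hd]; rfl
      rw [List.head?_eq_some_head hdne] at h1
      have hx : (List.dropWhile pS p.reverse).head hdne = x := Option.some_injective _ h1
      rw [hx] at h2
      simp [pS] at h2
      exact ⟨xs, by subst h2; rfl⟩
  have hdropT : dropT p = w.reverse ++ ['/'] := by
    rw [dropT, hw]
    simp
  have hsplitp : dropT p ++ tailT p = p := by
    rw [dropT, tailT, ← List.reverse_append, List.takeWhile_append_dropWhile]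
    simp
  have htns : '/' ∉ tailT p := by
    intro hx
    have := List.mem_takeWhile_imp (List.mem_reverse.mp hx)
    simp [pS] at this
  obtain ⟨st1, st2⟩ := struct p hmem
  obtain ⟨ps, a, hpa⟩ : ∃ ps a, mySplit p = ps ++ [a] := by
    rcases List.eq_nil_or_concat (mySplit p) with h0 | ⟨ps, a, hc⟩
    · exact absurd h0 (mySplit_ne_nil p)
    · exact ⟨ps, a, by rw [hc]; simp⟩
  have hpre : preC ps = dropT p := by rw [← st1, hpa, List.dropLast_concat]
  have hlast : a = tailT p := by rw [← st2, hpa, List.getLastD_concat]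
  show List.foldl (bodyA (((PySem.Chars.splitOn p ['/']).length : Int) - 1)) []
        (PySem.List.enumerate (PySem.Chars.splitOn p ['/'])) = _
  rw [splitOn_slash, hpa]
  have hN : ((ps ++ [a]).length : Int) - 1 = (ps.length : Int) := by
    simp
  rw [hN, PySem.List.enumerate_append, List.foldl_append,
    foldA_pre ps (ps.length) 0 [] (by omega)]
  rw [show PySem.List.enumerate [a] (0 + (ps.length : Int)) = [((ps.length : Int), a)] from by
    rw [PySem.List.enumerate_cons]
    simp [PySem.List.enumerate]]
  rw [List.foldl_cons, List.foldl_nil]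
  rw [show ([] : List Char) ++ preC ps = preC ps from by simp, hpre]
  rw [bodyA]
  rw [if_neg (by simp)]
  show (if PySem.List.pyGet?
        (if PySem.Chars.isIn ['.'] a = false then dropT p ++ a else dropT p) (-1) = some '/' then _ else _) = _
  rw [hlast]
  by_cases hemp : (tailT p).isEmpty = true
  · have ha : tailT p = [] := List.isEmpty_iff.mp hemp
    rw [ha]
    rw [show PySem.Chars.isIn ['.'] ([] : List Char) = false from by decide]
    rw [if_pos rfl, List.append_nil, hdropT, pyGet_concat, if_pos rfl, slice_dropLast,
      List.dropLast_concat]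
    rw [if_neg (by simp), hw]
    simp
  · have hane : tailT p ≠ [] := fun hh => hemp (List.isEmpty_iff.mpr hh)
    obtain ⟨t', c, htc⟩ : ∃ t' c, tailT p = t' ++ [c] := by
      rcases List.eq_nil_or_concat (tailT p) with h0 | ⟨t', c, hc⟩
      · exact absurd h0 hane
      · exact ⟨t', c, by rw [hc]; simp⟩
    have hcns : c ≠ '/' := by
      intro hcc
      exact htns (by rw [htc, hcc]; simp)
    have hpg : PySem.List.pyGet? (dropT p ++ tailT p) (-1) = some c := by
      rw [htc, ← List.append_assoc]
      exact pyGet_concat _ _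
    by_cases hdot : PySem.Chars.isIn ['.'] (tailT p) = false
    · rw [if_pos hdot, hpg, if_neg (by simp [hcns])]
      rw [if_pos ⟨by simp [hane], hdot⟩, hsplitp]
    · rw [if_neg hdot, hdropT, pyGet_concat, if_pos rfl, slice_dropLast, List.dropLast_concat]
      rw [if_neg (by
        intro hcontr
        exact hdot hcontr.2), hw]
      simp

-- ===== VERDICT (by name: the statement is the Claim_ definition above) =====
theorem found_dataset_spec : Claim_equal_found_dataset := by
  intro old_path notebook_id root_path origin_code _
  unfold Spec_found_dataset found_dataset found_dataset_alt
  by_cases h : PySem.Chars.isIn ['/'] old_path.toList = false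
  · simp only [h, if_pos rfl, if_true]
  · have ht : PySem.Chars.isIn ['/'] old_path.toList = true := by
      cases hb : PySem.Chars.isIn ['/'] old_path.toList with
      | false => exact absurd hb h
      | true => rfl
    simp only [ht, Bool.true_eq_false, if_false, key old_path.toList ht]
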